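-- pv_equiv track=rewrite | github.com/rozoza/uob_fp | complete_sum.py | adjustText
-- ===== SOURCE A (Python) =====
-- def adjustText(text):
--     while '(' in text:
--         text = text.replace('(', '-LRB-')
--     while ')' in text:
--         text = text.replace(')', '-RRB-')
--     while '[' in text:
--         text = text.replace('[', '-LSB-')
--     while ']' in text:
--         text = text.replace(']', '-RSB-')
--     return text
-- ===== SOURCE B (Python) =====
-- _MAPPING = {'(': '-LRB-', ')': '-RRB-', '[': '-LSB-', ']': '-RSB-'}
--
-- def adjustText(text):
--     return ''.join(_MAPPING.get(c, c) for c in text)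
-- ===== Notes on version B (the rewrite author's own statement) =====
-- stated objective: idiomatic
-- what changed: Replaces four sequential whole-string replace passes (each guarded by a substring-containment while loop) with a single pass that translates each character through a bracket-to-PTB-token dict and joins the pieces.
import Mathlib
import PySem

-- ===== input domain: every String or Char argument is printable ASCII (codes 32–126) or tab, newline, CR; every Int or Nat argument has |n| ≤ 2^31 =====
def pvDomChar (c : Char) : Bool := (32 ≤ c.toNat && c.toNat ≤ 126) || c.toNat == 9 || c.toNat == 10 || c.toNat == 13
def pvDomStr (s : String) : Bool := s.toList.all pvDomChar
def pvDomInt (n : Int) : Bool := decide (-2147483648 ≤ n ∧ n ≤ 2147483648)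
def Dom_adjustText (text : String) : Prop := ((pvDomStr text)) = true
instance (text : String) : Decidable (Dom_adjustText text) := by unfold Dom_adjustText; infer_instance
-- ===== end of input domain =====

-- B replaces A's four sequential whole-string replace passes with one pass translating
-- each character through a bracket→PTB-token dict and joining (objective: idiomatic).

-- ===== PORT A =====
-- while old in text: text = text.replace(old, new)  — transliterated with fuel len(text)+1
def pyWhileReplace : Nat → String → String → String → String
  | 0, t, _, _ => t
  | fuel + 1, t, old, new =>
    if PySem.Str.isIn old t then pyWhileReplace fuel (PySem.Str.replace t old new) old new
    else t

def adjustText (text : String) : String :=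
  let t1 := pyWhileReplace ((PySem.Str.len text).toNat + 1) text "(" "-LRB-"
  let t2 := pyWhileReplace ((PySem.Str.len t1).toNat + 1) t1 ")" "-RRB-"
  let t3 := pyWhileReplace ((PySem.Str.len t2).toNat + 1) t2 "[" "-LSB-"
  let t4 := pyWhileReplace ((PySem.Str.len t3).toNat + 1) t3 "]" "-RSB-"
  t4

-- ===== PORT B =====
def bracketMap : PySem.Dict Char String :=
  PySem.Dict.ofList [('(', "-LRB-"), (')', "-RRB-"), ('[', "-LSB-"), (']', "-RSB-")]

def adjustText_alt (text : String) : String :=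
  PySem.Str.join "" (text.toList.map (fun c => bracketMap.getD c (String.ofList [c])))

-- ===== PRECONDITION & SPEC =====
def Spec_adjustText (text : String) (out : String) : Prop := out = adjustText_alt text
instance (text : String) (out : String) : Decidable (Spec_adjustText text out) := by unfold Spec_adjustText; infer_instance

-- ===== CLAIM (what is proved, stated in full; the proofs are below) =====
def Claim_equal_adjustText : Prop := ∀ (text : String), Dom_adjustText text → Spec_adjustText text (adjustText text)

-- ===== LEMMAS AND PROOFS =====

-- single-character substitution as a per-character flatMap
def brSub (c : Char) (new : List Char) (l : List Char) : List Char :=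
  l.flatMap (fun x => if x = c then new else [x])

theorem brSub_id_of_not_mem (c : Char) (new : List Char) :
    ∀ l : List Char, c ∉ l → brSub c new l = l := by
  intro l
  induction l with
  | nil => intro _; rfl
  | cons a t ih =>
    intro h
    simp only [List.mem_cons, not_or] at h
    rw [show brSub c new (a :: t)
        = (if a = c then new else [a]) ++ brSub c new t from rfl]
    rw [if_neg (fun hac => h.1 hac.symm), ih h.2]
    rfl

theorem isIn_singleton_iff (c : Char) (l : List Char) :
    PySem.Chars.isIn [c] l = true ↔ c ∈ l := by
  rw [PySem.Chars.isIn_iff_infix]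
  constructor
  · intro h; simpa using h.sublist
  · intro h
    obtain ⟨s, t, rfl⟩ := List.append_of_mem h
    exact ⟨s, t, by simp⟩

theorem go_single (c : Char) (new : List Char) :
    ∀ (l acc : List Char) (fuel : Nat), l.length ≤ fuel →
      PySem.Chars.replace.go [c] new fuel l acc = acc.reverse ++ brSub c new l := by
  intro l
  induction l with
  | nil =>
    intro acc fuel _
    cases fuel <;> simp [PySem.Chars.replace.go, brSub]
  | cons a t ih =>
    intro acc fuel hf
    cases fuel with
    | zero => simp at hf
    | succ m =>
      by_cases hac : a = c
      · subst hac
        rw [PySem.Chars.replace.go]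
        have hp : [a].isPrefixOf (a :: t) = true := by simp [List.isPrefixOf]
        rw [if_pos hp]
        have hd : List.drop [a].length (a :: t) = t := by simp
        rw [hd, ih (new.reverse ++ acc) m (by simpa using hf)]
        simp [brSub]
      · rw [PySem.Chars.replace.go]
        have hp : [c].isPrefixOf (a :: t) = false := by
          simp [List.isPrefixOf]; exact fun h => absurd h.symm hac
        rw [if_neg (by simp [hp])]
        rw [ih (a :: acc) m (by simpa using hf)]
        simp [brSub, hac]

theorem replace_single (c : Char) (new l : List Char) :
    PySem.Chars.replace l [c] new = brSub c new l := by
  unfold PySem.Chars.replace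
  simp [go_single c new l [] l.length le_rfl]

theorem not_mem_brSub (c : Char) (new : List Char) (hn : c ∉ new) (l : List Char) :
    c ∉ brSub c new l := by
  intro h
  simp only [brSub, List.mem_flatMap] at h
  obtain ⟨x, _, hx⟩ := h
  by_cases hxc : x = c
  · rw [if_pos hxc] at hx; exact hn hx
  · rw [if_neg hxc] at hx; simp at hx; exact hxc hx.symm

-- one Python while-loop: the condition fails after a single replace, so the loop
-- performs exactly one substitution pass (or none)
theorem stage_eq (old token : String) (c : Char) (h : old.toList = [c])
    (hn : c ∉ token.toList) (t : String) :
    (pyWhileReplace ((PySem.Str.len t).toNat + 1) t old token).toList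
      = brSub c token.toList t.toList := by
  have hrep : ∀ s : String,
      (PySem.Str.replace s old token).toList = brSub c token.toList s.toList := by
    intro s; rw [PySem.Str.toList_replace, h, replace_single]
  by_cases hin : PySem.Str.isIn old t = true
  · have hc : c ∈ t.toList := by
      rw [PySem.Str.isIn_eq, h] at hin
      exact (isIn_singleton_iff c t.toList).mp hin
    have hlen : (PySem.Str.len t).toNat = t.toList.length := by
      simp [PySem.Str.len_eq]
    obtain ⟨m, hm⟩ : ∃ m, (PySem.Str.len t).toNat = m + 1 := by
      have h0 : t.toList.length ≠ 0 := by
        intro h0; rw [List.length_eq_zero_iff] at h0; rw [h0] at hc; simp at hc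
      exact ⟨(PySem.Str.len t).toNat - 1, by omega⟩
    have hin2 : PySem.Str.isIn old (PySem.Str.replace t old token) = false := by
      rw [PySem.Str.isIn_eq, h, ← Bool.not_eq_true, isIn_singleton_iff, hrep]
      exact not_mem_brSub c token.toList hn t.toList
    rw [hm]
    have step1 : pyWhileReplace (m + 1 + 1) t old token
        = if PySem.Str.isIn old t
          then pyWhileReplace (m + 1) (PySem.Str.replace t old token) old token
          else t := rfl
    have step2 : pyWhileReplace (m + 1) (PySem.Str.replace t old token) old token
        = if PySem.Str.isIn old (PySem.Str.replace t old token)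
          then pyWhileReplace m
            (PySem.Str.replace (PySem.Str.replace t old token) old token) old token
          else PySem.Str.replace t old token := rfl
    have hin2' : ¬ PySem.Str.isIn old (PySem.Str.replace t old token) = true := by
      rw [hin2]; decide
    rw [step1, if_pos hin, step2, if_neg hin2', hrep]
  · have hc : c ∉ t.toList := by
      rw [PySem.Str.isIn_eq, h] at hin
      rw [← isIn_singleton_iff c t.toList]
      simpa using hin
    have step : pyWhileReplace ((PySem.Str.len t).toNat + 1) t old token
        = if PySem.Str.isIn old t
          then pyWhileReplace ((PySem.Str.len t).toNat)
            (PySem.Str.replace t old token) old token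
          else t := rfl
    rw [step, if_neg hin]
    exact (brSub_id_of_not_mem c token.toList t.toList hc).symm

theorem join_nil_eq_flatten (l : List (List Char)) : PySem.Chars.join [] l = l.flatten := by
  induction l with
  | nil => rfl
  | cons a t ih =>
    cases t with
    | nil => simp [PySem.Chars.join, List.intercalate]
    | cons b u =>
      simp only [PySem.Chars.join, List.intercalate] at ih ⊢
      simp [List.intersperse] at ih ⊢
      exact ih

-- the four substitutions chained equal B's table lookup, character by character
theorem chain_eq (l : List Char) :
    brSub ']' "-RSB-".toList (brSub '[' "-LSB-".toList
      (brSub ')' "-RRB-".toList (brSub '(' "-LRB-".toList l)))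
    = l.flatMap (fun c => (bracketMap.getD c (String.ofList [c])).toList) := by
  induction l with
  | nil => rfl
  | cons a t ih =>
    simp only [brSub, List.flatMap_cons, List.flatMap_append] at ih ⊢
    refine congrArg₂ (· ++ ·) ?_ ih
    by_cases h1 : a = '('
    · subst h1; decide
    by_cases h2 : a = ')'
    · subst h2; decide
    by_cases h3 : a = '['
    · subst h3; decide
    by_cases h4 : a = ']'
    · subst h4; decide
    have hc : bracketMap.contains a = false := by
      simp [bracketMap, PySem.Dict.ofList, PySem.Dict.update, PySem.Dict.contains_insert,
        PySem.Dict.contains_empty, h1, h2, h3, h4]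
    rw [PySem.Dict.getD_of_not_contains _ _ hc]
    simp [h1, h2, h3, h4]

-- ===== VERDICT (by name: the statement is the Claim_ definition above) =====
theorem adjustText_spec : Claim_equal_adjustText := by
  intro text _
  show adjustText text = adjustText_alt text
  apply String.toList_inj.mp
  have hA : (adjustText text).toList =
      brSub ']' "-RSB-".toList (brSub '[' "-LSB-".toList
        (brSub ')' "-RRB-".toList (brSub '(' "-LRB-".toList text.toList))) := by
    unfold adjustText
    rw [stage_eq "]" "-RSB-" ']' (by decide) (by decide),
        stage_eq "[" "-LSB-" '[' (by decide) (by decide),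
        stage_eq ")" "-RRB-" ')' (by decide) (by decide),
        stage_eq "(" "-LRB-" '(' (by decide) (by decide)]
  have hB : (adjustText_alt text).toList =
      text.toList.flatMap (fun c => (bracketMap.getD c (String.ofList [c])).toList) := by
    unfold adjustText_alt
    rw [PySem.Str.toList_join, show ("".toList : List Char) = [] from rfl,
        join_nil_eq_flatten, List.map_map]
    simp [List.flatMap_def, Function.comp_def]
  rw [hA, hB, chain_eq]
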